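-- pv_equiv track=rewrite | github.com/Fenoxe/bubbleSortAlgorithm | bubbleSortAlgo_vanilla_multi.py | getReachableStates
-- ===== SOURCE A (Python) =====
-- from itertools import product
--
-- def getTop(state, i):
--     if state[4 * i + 3] != ' ':
--         return state[4 * i + 3]
--     if state[4 * i + 2] != ' ':
--         return state[4 * i + 2]
--     if state[4 * i + 1] != ' ':
--         return state[4 * i + 1]
--     return state[4 * i]
--
-- def setTop(state, i, ball):
--     if state[4 * i] == ' ':
--         return ''.join((state[:4 * i],ball,state[4 * i + 1:]))
--     if state[4 * i + 1] == ' ':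
--         return ''.join((state[:4 * i + 1],ball,state[4 * i + 2:]))
--     if state[4 * i + 2] == ' ':
--         return ''.join((state[:4 * i + 2],ball,state[4 * i + 3:]))
--     return ''.join((state[:4 * i + 3],ball,state[4 * i + 4:]))
--
-- def remTop(state, i):
--     if state[4 * i + 3] != ' ':
--         return ''.join((state[:4 * i + 3],' ',state[4 * i + 4:]))
--     if state[4 * i + 2] != ' ':
--         return ''.join((state[:4 * i + 2],' ',state[4 * i + 3:]))
--     if state[4 * i + 1] != ' ':
--         return ''.join((state[:4 * i + 1],' ',state[4 * i + 2:]))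
--     return ''.join((state[:4 * i],' ',state[4 * i + 1:]))
--
-- def isEmpty(state, i):
--     return state[4 * i] == ' '
--
-- def isFull(state, i):
--     return state[4 * i + 3] != ' '
--
-- def moveBall(state, i, j):
--     ball = getTop(state, i)
--     newState = setTop(state, j, ball)
--     newState = remTop(newState, i)
--     return newState
--
-- def getReachableStates(currState):
--     numBins = len(currState) // 4
--
--     empty_bins = set( i for i in range(numBins) if isEmpty(currState, i))
--     full_bins  = set( i for i in range(numBins) if isFull(currState, i))
--     top_ball = [getTop(currState, i) for i in range(numBins)]
--
--     for i,j in product(range(numBins), range(numBins)):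
--         if i == j:
--             continue
--         if i in empty_bins:
--             continue
--         if j in full_bins:
--             continue
--         if j in empty_bins or (top_ball[i] == top_ball[j]):
--             yield moveBall(currState, i, j)
-- ===== SOURCE B (Python) =====
-- def getReachableStates(currState):
--     numBins = len(currState) // 4
--     s = list(currState)
--
--     chunks = [currState[4 * k:4 * k + 4] for k in range(numBins)]
--     rem = [max(len(c.rstrip(' ')) - 1, 0) for c in chunks]          # highest occupied slot (0 if empty)
--     tops = [chunks[k][rem[k]] for k in range(numBins)]              # top ball colour
--     ins = [c.index(' ') if ' ' in c else 3 for c in chunks]         # lowest free slot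
--     empty_bins = {k for k in range(numBins) if chunks[k][0] == ' '}
--     full_bins = {k for k in range(numBins) if chunks[k][3] != ' '}
--
--     color_index = {}                                                # top colour -> bins with that top
--     for k in range(numBins):
--         color_index.setdefault(tops[k], set()).add(k)
--
--     for i in range(numBins):
--         if i in empty_bins:
--             continue
--         for j in sorted((empty_bins | color_index[tops[i]]) - full_bins - {i}):
--             t = s.copy()
--             t[4 * j + ins[j]] = tops[i]
--             t[4 * i + rem[i]] = ' '
--             yield ''.join(t)
-- ===== Notes on version B (the rewrite author's own statement) =====
-- stated objective: faster
-- what changed: Instead of A's O(n^2) product scan that tests every ordered bin pair (i,j) against set memberships and re-derives each move through branch-chained string-slicing helpers, B makes one indexing pass per bin (top colour, lowest free slot, highest occupied slot, empty/full sets, a colour-to-bins dict), then for each non-empty source takes destinations directly as the sorted set (empty | same-top-colour) - full - {i} and emits each new state by two-position surgery on a shared character list.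
import Mathlib
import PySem

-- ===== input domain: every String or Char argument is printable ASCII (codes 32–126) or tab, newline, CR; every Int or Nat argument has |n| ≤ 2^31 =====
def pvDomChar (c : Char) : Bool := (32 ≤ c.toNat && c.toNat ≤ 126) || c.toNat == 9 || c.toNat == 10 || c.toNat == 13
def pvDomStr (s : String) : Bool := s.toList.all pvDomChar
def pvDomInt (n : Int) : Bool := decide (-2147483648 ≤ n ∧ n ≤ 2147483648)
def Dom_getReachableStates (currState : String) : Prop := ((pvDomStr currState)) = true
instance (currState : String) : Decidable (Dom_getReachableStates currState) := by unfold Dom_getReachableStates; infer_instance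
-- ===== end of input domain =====

-- B replaces A's pairwise product scan by a per-bin index (top colour, fill slots, a
-- colour→bins dict) with sorted set destinations and direct two-position surgery
-- (objective: alternative decomposition, same output order).

-- ===== PORT A =====
-- Bin indices are Nats: A only indexes with i ∈ range(len(state)//4), so every string index
-- 4*i+t (t ≤ 3) is a nonnegative in-range Python index; List.getD is exact there.
def pyGetTop (s : List Char) (i : Nat) : Char :=
  if s.getD (4*i+3) ' ' ≠ ' ' then s.getD (4*i+3) ' '
  else if s.getD (4*i+2) ' ' ≠ ' ' then s.getD (4*i+2) ' '
  else if s.getD (4*i+1) ' ' ≠ ' ' then s.getD (4*i+1) ' '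
  else s.getD (4*i) ' '

-- ''.join((state[:k], ball, state[k+1:])) is take k ++ ball :: drop (k+1) (indices in range)
def pySetTop (s : List Char) (i : Nat) (b : Char) : List Char :=
  if s.getD (4*i) ' ' = ' ' then s.take (4*i) ++ b :: s.drop (4*i+1)
  else if s.getD (4*i+1) ' ' = ' ' then s.take (4*i+1) ++ b :: s.drop (4*i+2)
  else if s.getD (4*i+2) ' ' = ' ' then s.take (4*i+2) ++ b :: s.drop (4*i+3)
  else s.take (4*i+3) ++ b :: s.drop (4*i+4)

def pyRemTop (s : List Char) (i : Nat) : List Char :=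
  if s.getD (4*i+3) ' ' ≠ ' ' then s.take (4*i+3) ++ ' ' :: s.drop (4*i+4)
  else if s.getD (4*i+2) ' ' ≠ ' ' then s.take (4*i+2) ++ ' ' :: s.drop (4*i+3)
  else if s.getD (4*i+1) ' ' ≠ ' ' then s.take (4*i+1) ++ ' ' :: s.drop (4*i+2)
  else s.take (4*i) ++ ' ' :: s.drop (4*i+1)

def pyIsEmpty (s : List Char) (i : Nat) : Bool := s.getD (4*i) ' ' == ' '

def pyIsFull (s : List Char) (i : Nat) : Bool := s.getD (4*i+3) ' ' != ' '

def pyMoveBall (s : List Char) (i j : Nat) : List Char :=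
  pyRemTop (pySetTop s j (pyGetTop s i)) i

-- the three locals of A (numBins inlined as s.length / 4)
def aEmptyBins (s : List Char) : PySem.Set Nat :=
  PySem.Set.ofList ((List.range (s.length / 4)).filter (fun i => pyIsEmpty s i))

def aFullBins (s : List Char) : PySem.Set Nat :=
  PySem.Set.ofList ((List.range (s.length / 4)).filter (fun i => pyIsFull s i))

def aTopBall (s : List Char) : List Char :=
  (List.range (s.length / 4)).map (fun i => pyGetTop s i)

-- the generator, materialised as the list of yields; product(range, range) is the flatMap
-- over i of the j-loop, 'continue' is the none branch of the filterMap
def getReachableStates (currState : String) : List String :=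
  let s := currState.toList
  (List.range (s.length / 4)).flatMap (fun i =>
    (List.range (s.length / 4)).filterMap (fun j =>
      if i = j then none
      else if i ∈ aEmptyBins s then none
      else if j ∈ aFullBins s then none
      else if j ∈ aEmptyBins s ∨ (aTopBall s).getD i ' ' = (aTopBall s).getD j ' ' then
        some (String.ofList (pyMoveBall s i j))
      else none))

-- ===== PORT B =====
-- c.rstrip(' ') ported by hand (PySem.Chars.rstrip strips all whitespace): drop trailing
-- spaces only — exact for any character content.
def altRstripSpace (c : List Char) : List Char := (c.reverse.dropWhile (· == ' ')).reverse

-- c.index(' ') if ' ' in c else 3  (index? is none exactly when ' ' is not in c)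
def altInsSlot (c : List Char) : Nat :=
  match PySem.List.index? c ' ' with
  | some p => p
  | none => 3

-- the locals of B (Source B's comprehensions; numBins inlined as s.length / 4)
def bChunks (s : List Char) : List (List Char) :=
  (List.range (s.length / 4)).map (fun k => (s.drop (4*k)).take 4)

def bRem (s : List Char) : List Nat :=
  (bChunks s).map (fun c => (altRstripSpace c).length - 1)   -- Nat sub = max(len-1, 0)

def bTops (s : List Char) : List Char :=
  (List.range (s.length / 4)).map (fun k => ((bChunks s).getD k []).getD ((bRem s).getD k 0) ' ')

def bIns (s : List Char) : List Nat := (bChunks s).map (fun c => altInsSlot c)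

def bEmptyBins (s : List Char) : PySem.Set Nat :=
  PySem.Set.ofList ((List.range (s.length / 4)).filter
    (fun k => ((bChunks s).getD k []).getD 0 ' ' == ' '))

def bFullBins (s : List Char) : PySem.Set Nat :=
  PySem.Set.ofList ((List.range (s.length / 4)).filter
    (fun k => ((bChunks s).getD k []).getD 3 ' ' != ' '))

-- color_index.setdefault(tops[k], set()).add(k); Dict.getD [] is exact: tops[i] is always a key
def bColorIndex (s : List Char) : PySem.Dict Char (PySem.Set Nat) :=
  (List.range (s.length / 4)).foldl
    (fun d k => d.modify ((bTops s).getD k ' ') [] (fun st => PySem.Set.add st k))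
    PySem.Dict.empty

def getReachableStates_alt (currState : String) : List String :=
  let s := currState.toList
  (List.range (s.length / 4)).flatMap (fun i =>
    if i ∈ bEmptyBins s then []
    else
      (PySem.List.sorted
        (PySem.Set.diff
          (PySem.Set.diff
            (PySem.Set.union (bEmptyBins s) ((bColorIndex s).getD ((bTops s).getD i ' ') []))
            (bFullBins s))
          [i])
        (fun x => x)).map
        (fun j =>
          String.ofList
            ((s.set (4*j + (bIns s).getD j 0) ((bTops s).getD i ' ')).set
              (4*i + (bRem s).getD i 0) ' ')))

-- ===== PRECONDITION & SPEC =====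
def Spec_getReachableStates (currState : String) (out : List String) : Prop := out = getReachableStates_alt currState
instance (currState : String) (out : List String) : Decidable (Spec_getReachableStates currState out) := by unfold Spec_getReachableStates; infer_instance

-- ===== CLAIM (what is proved, stated in full; the proofs are below) =====
def Claim_equal_getReachableStates : Prop := ∀ (currState : String), Dom_getReachableStates currState → Spec_getReachableStates currState (getReachableStates currState)

-- ===== LEMMAS AND PROOFS =====

-- the four characters of bin k
def binCh (s : List Char) (k t : Nat) : Char := s.getD (4*k+t) ' '

-- the slot A's remTop clears (= the slot getTop reads)
def topIdx (s : List Char) (k : Nat) : Nat :=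
  if binCh s k 3 ≠ ' ' then 3 else if binCh s k 2 ≠ ' ' then 2
  else if binCh s k 1 ≠ ' ' then 1 else 0

-- the slot A's setTop fills
def insIdx (s : List Char) (k : Nat) : Nat :=
  if binCh s k 0 = ' ' then 0 else if binCh s k 1 = ' ' then 1
  else if binCh s k 2 = ' ' then 2 else 3

theorem getD_set_ne (l : List Char) (m n : Nat) (h : n ≠ m) (a d : Char) :
    (l.set m a).getD n d = l.getD n d := by
  simp [List.getD_eq_getElem?_getD, Ne.symm h]

theorem chunk_eq (s : List Char) (k : Nat) (hk : k < s.length / 4) :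
    (s.drop (4*k)).take 4 = [binCh s k 0, binCh s k 1, binCh s k 2, binCh s k 3] := by
  have h4 : 4*k+4 ≤ s.length := by omega
  apply List.ext_getElem
  · simp; omega
  · intro i h1 h2
    have hi : i < 4 := by simpa using h2
    have e1 : ((s.drop (4*k)).take 4)[i] = s[4*k+i]'(by omega) := by
      simp [List.getElem_take, List.getElem_drop]
    rw [e1]
    unfold binCh
    interval_cases i <;> simp <;> rw [List.getElem?_eq_getElem (by omega)]
    · rfl
    · rfl
    · rfl
    · rfl

theorem rem_eq' (a b c d : Char) :
    (altRstripSpace [a,b,c,d]).length - 1 =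
      (if d ≠ ' ' then 3 else if c ≠ ' ' then 2 else if b ≠ ' ' then 1 else 0) := by
  by_cases hd : d = ' ' <;> by_cases hc : c = ' ' <;> by_cases hb : b = ' ' <;>
    by_cases ha : a = ' ' <;> simp [altRstripSpace, hd, hc, hb, ha]

theorem top_eq' (a b c d : Char) :
    ([a,b,c,d].getD (if d ≠ ' ' then 3 else if c ≠ ' ' then 2 else if b ≠ ' ' then 1 else 0) ' ') =
      (if d ≠ ' ' then d else if c ≠ ' ' then c else if b ≠ ' ' then b else a) := by
  by_cases hd : d = ' ' <;> by_cases hc : c = ' ' <;> by_cases hb : b = ' ' <;> simp [hd, hc, hb]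

theorem ins_eq' (a b c : Char) :
    altInsSlot [a,b,c,' '] =
      (if a = ' ' then 0 else if b = ' ' then 1 else if c = ' ' then 2 else 3) := by
  by_cases ha : a = ' ' <;> by_cases hb : b = ' ' <;> by_cases hc : c = ' ' <;>
    simp [altInsSlot, PySem.List.index?, List.idxOf?, List.findIdx?_cons, ha, hb, hc]

theorem chunks_getD (s : List Char) (k : Nat) (hk : k < s.length / 4) :
    (bChunks s).getD k [] = [binCh s k 0, binCh s k 1, binCh s k 2, binCh s k 3] := by
  unfold bChunks
  rw [PySem.List.getD_map_range _ _ _ _ hk, chunk_eq s k hk]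

theorem rem_getD (s : List Char) (k : Nat) (hk : k < s.length / 4) :
    (bRem s).getD k 0 = topIdx s k := by
  unfold bRem bChunks
  rw [List.map_map, PySem.List.getD_map_range _ _ _ _ hk]
  simp only [Function.comp_apply, chunk_eq s k hk]
  exact rem_eq' _ _ _ _

theorem tops_getD (s : List Char) (k : Nat) (hk : k < s.length / 4) :
    (bTops s).getD k ' ' = pyGetTop s k := by
  unfold bTops
  rw [PySem.List.getD_map_range _ _ _ _ hk, chunks_getD s k hk, rem_getD s k hk]
  unfold topIdx
  rw [top_eq']
  rfl

theorem ins_getD (s : List Char) (k : Nat) (hk : k < s.length / 4) (hnf : binCh s k 3 = ' ') :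
    (bIns s).getD k 0 = insIdx s k := by
  unfold bIns bChunks
  rw [List.map_map, PySem.List.getD_map_range _ _ _ _ hk]
  simp only [Function.comp_apply, chunk_eq s k hk, hnf]
  rw [ins_eq']
  rfl

theorem mem_aEmpty (s : List Char) (j : Nat) :
    j ∈ aEmptyBins s ↔ j < s.length / 4 ∧ binCh s j 0 = ' ' := by
  unfold aEmptyBins
  rw [PySem.Set.mem_ofList]
  simp [List.mem_filter, pyIsEmpty, binCh]

theorem mem_aFull (s : List Char) (j : Nat) :
    j ∈ aFullBins s ↔ j < s.length / 4 ∧ binCh s j 3 ≠ ' ' := by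
  unfold aFullBins
  rw [PySem.Set.mem_ofList]
  simp [List.mem_filter, pyIsFull, binCh]

theorem mem_bEmpty (s : List Char) (j : Nat) :
    j ∈ bEmptyBins s ↔ j < s.length / 4 ∧ binCh s j 0 = ' ' := by
  unfold bEmptyBins
  rw [PySem.Set.mem_ofList]
  simp only [List.mem_filter, List.mem_range, beq_iff_eq]
  constructor
  · rintro ⟨h1, h2⟩
    rw [chunks_getD s j h1] at h2
    exact ⟨h1, by simpa using h2⟩
  · rintro ⟨h1, h2⟩
    refine ⟨h1, ?_⟩
    rw [chunks_getD s j h1]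
    simpa using h2

theorem mem_bFull (s : List Char) (j : Nat) :
    j ∈ bFullBins s ↔ j < s.length / 4 ∧ binCh s j 3 ≠ ' ' := by
  unfold bFullBins
  rw [PySem.Set.mem_ofList]
  simp only [List.mem_filter, List.mem_range, bne_iff_ne]
  constructor
  · rintro ⟨h1, h2⟩
    rw [chunks_getD s j h1] at h2
    exact ⟨h1, by simpa using h2⟩
  · rintro ⟨h1, h2⟩
    refine ⟨h1, ?_⟩
    rw [chunks_getD s j h1]
    simpa using h2

theorem colorIndex_mem_aux (tp : Nat → Char) (l : List Nat) (d : PySem.Dict Char (PySem.Set Nat))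
    (t : Char) (j : Nat) :
    j ∈ (l.foldl (fun d k => d.modify (tp k) [] (fun st => PySem.Set.add st k)) d).getD t [] ↔
      j ∈ d.getD t [] ∨ (j ∈ l ∧ tp j = t) := by
  induction l generalizing d with
  | nil => simp
  | cons k l ih =>
    simp only [List.foldl_cons, ih, PySem.Dict.getD_modify, List.mem_cons]
    by_cases ht : t = tp k
    · rw [if_pos ht, PySem.Set.mem_add]
      subst ht
      constructor
      · rintro ((h | rfl) | ⟨hl, htj⟩)
        · exact Or.inl h
        · exact Or.inr ⟨Or.inl rfl, rfl⟩
        · exact Or.inr ⟨Or.inr hl, htj⟩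
      · rintro (h | ⟨(rfl | hl), htj⟩)
        · exact Or.inl (Or.inl h)
        · exact Or.inl (Or.inr rfl)
        · exact Or.inr ⟨hl, htj⟩
    · rw [if_neg ht]
      constructor
      · rintro (h | ⟨hl, htj⟩)
        · exact Or.inl h
        · exact Or.inr ⟨Or.inr hl, htj⟩
      · rintro (h | ⟨(rfl | hl), ht'⟩)
        · exact Or.inl h
        · exact absurd ht'.symm ht
        · exact Or.inr ⟨hl, ht'⟩

theorem mem_colorIndex (s : List Char) (t : Char) (j : Nat) :
    j ∈ (bColorIndex s).getD t [] ↔ j < s.length / 4 ∧ (bTops s).getD j ' ' = t := by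
  unfold bColorIndex
  rw [colorIndex_mem_aux]
  simp [PySem.Dict.getD_empty]

theorem filterMap_chain {α β : Type} (l : List α) (p1 p2 p3 : α → Prop)
    [DecidablePred p1] [DecidablePred p2] [DecidablePred p3] (f : α → β) :
    (l.filterMap (fun j =>
        if p1 j then none else if p2 j then none
        else if p3 j then some (f j) else none)) =
      (l.filter (fun j => decide (¬ p1 j ∧ ¬ p2 j ∧ p3 j))).map f := by
  induction l with
  | nil => rfl
  | cons x xs ih =>
    simp only [List.filterMap_cons, List.filter_cons]
    split_ifs with h1 h2 h3 <;> simp_all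

theorem insIdx_le (s : List Char) (k : Nat) : insIdx s k ≤ 3 := by
  unfold insIdx; split_ifs <;> omega

theorem setTop_eq (s : List Char) (j : Nat) (b : Char) (hj : j < s.length / 4) :
    pySetTop s j b = s.set (4*j + insIdx s j) b := by
  have h4 : 4*j+4 ≤ s.length := by omega
  unfold pySetTop insIdx binCh
  simp only [Nat.add_zero]
  split_ifs with h1 h2 h3 <;> rw [List.set_eq_take_cons_drop _ (by omega)] <;> norm_num

theorem remTop_eq (s s' : List Char) (i : Nat) (hi : i < s.length / 4)
    (hlen : s'.length = s.length) (hagree : ∀ t, t < 4 → binCh s' i t = binCh s i t) :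
    pyRemTop s' i = s'.set (4*i + topIdx s i) ' ' := by
  have h4 : 4*i+4 ≤ s.length := by omega
  have e3 := hagree 3 (by omega)
  have e2 := hagree 2 (by omega)
  have e1 := hagree 1 (by omega)
  unfold pyRemTop topIdx
  unfold binCh at e3 e2 e1 ⊢
  rw [e3, e2, e1]
  split_ifs with h1 h2 h3 <;> rw [List.set_eq_take_cons_drop _ (by omega)] <;> norm_num

theorem move_eq (s : List Char) (i j : Nat) (hi : i < s.length / 4) (hj : j < s.length / 4)
    (hij : i ≠ j) :
    pyMoveBall s i j = (s.set (4*j + insIdx s j) (pyGetTop s i)).set (4*i + topIdx s i) ' ' := by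
  unfold pyMoveBall
  rw [setTop_eq s j _ hj]
  have hins := insIdx_le s j
  apply remTop_eq s _ i hi
  · simp
  · intro t ht
    unfold binCh
    apply getD_set_ne
    omega

theorem aTop_getD (s : List Char) (k : Nat) (hk : k < s.length / 4) :
    (aTopBall s).getD k ' ' = pyGetTop s k := by
  unfold aTopBall
  exact PySem.List.getD_map_range _ _ _ _ hk

-- B's sorted candidate set is exactly A's kept j's, in ascending order
theorem sorted_cands (s : List Char) (i : Nat) (hi : i < s.length / 4) :
    PySem.List.sorted
        (PySem.Set.diff
          (PySem.Set.diff
            (PySem.Set.union (bEmptyBins s) ((bColorIndex s).getD ((bTops s).getD i ' ') []))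
            (bFullBins s))
          [i])
        (fun x => x) =
      (List.range (s.length / 4)).filter (fun j => decide (¬ i = j ∧ ¬ j ∈ aFullBins s ∧ (j ∈ aEmptyBins s ∨ (aTopBall s).getD i ' ' = (aTopBall s).getD j ' '))) := by
  apply PySem.List.sorted_eq_of_perm_of_pairwise_lt
  · apply (List.perm_ext_iff_of_nodup (List.nodup_range.filter _) ?_).mpr
    · intro a
      by_cases han : a < s.length / 4
      · simp only [List.mem_filter, List.mem_range, decide_eq_true_eq, PySem.Set.mem_diff,
          PySem.Set.mem_union, mem_bEmpty, mem_bFull, mem_aEmpty, mem_aFull, mem_colorIndex,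
          List.mem_singleton]
        rw [tops_getD s a han, tops_getD s i hi, aTop_getD s a han, aTop_getD s i hi]
        constructor
        · rintro ⟨han, hne, hnF, hcond⟩
          refine ⟨⟨?_, hnF⟩, fun h => hne h.symm⟩
          rcases hcond with h | h
          · exact Or.inl h
          · exact Or.inr ⟨han, h.symm⟩
        · rintro ⟨⟨hcond, hnF⟩, hne⟩
          refine ⟨han, fun h => hne h.symm, hnF, ?_⟩
          rcases hcond with h | h
          · exact Or.inl h
          · exact Or.inr h.2.symm
      · constructor
        · intro h
          rw [List.mem_filter, List.mem_range] at h
          exact absurd h.1 han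
        · intro h
          simp only [PySem.Set.mem_diff, PySem.Set.mem_union, mem_bEmpty, mem_bFull,
            mem_colorIndex, List.mem_singleton] at h
          rcases h with ⟨⟨h1 | h1, _⟩, _⟩ <;> exact absurd h1.1 han
    · exact PySem.Set.nodup_diff _ _ (PySem.Set.nodup_diff _ _
        (PySem.Set.nodup_union _ _ (PySem.Set.nodup_ofList _)))
  · exact List.pairwise_lt_range.filter _

-- ===== VERDICT (by name: the statement is the Claim_ definition above) =====
theorem getReachableStates_spec : Claim_equal_getReachableStates := by
  intro currState _
  unfold Spec_getReachableStates getReachableStates getReachableStates_alt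
  dsimp only
  apply List.flatMap_congr
  intro i him
  rw [List.mem_range] at him
  by_cases hiE : i ∈ aEmptyBins (currState.toList)
  · have hiE' : i ∈ bEmptyBins (currState.toList) := by
      rw [mem_bEmpty]; exact (mem_aEmpty _ i).mp hiE
    rw [if_pos hiE']
    apply List.filterMap_eq_nil_iff.mpr
    intro j _
    by_cases hij : i = j
    · rw [if_pos hij]
    · rw [if_neg hij, if_pos hiE]
  · have hiE' : i ∉ bEmptyBins (currState.toList) := fun h =>
      hiE ((mem_aEmpty _ i).mpr ((mem_bEmpty _ i).mp h))
    rw [if_neg hiE']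
    have hA : (List.range (currState.toList.length / 4)).filterMap (fun j =>
          if i = j then none
          else if i ∈ aEmptyBins (currState.toList) then none
          else if j ∈ aFullBins (currState.toList) then none
          else if j ∈ aEmptyBins (currState.toList) ∨
              (aTopBall (currState.toList)).getD i ' ' = (aTopBall (currState.toList)).getD j ' ' then
            some (String.ofList (pyMoveBall (currState.toList) i j))
          else none) =
        (List.range (currState.toList.length / 4)).filterMap (fun j =>
          if i = j then none
          else if j ∈ aFullBins (currState.toList) then none
          else if j ∈ aEmptyBins (currState.toList) ∨
              (aTopBall (currState.toList)).getD i ' ' = (aTopBall (currState.toList)).getD j ' ' then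
            some (String.ofList (pyMoveBall (currState.toList) i j))
          else none) := by
      apply List.filterMap_congr
      intro j _
      by_cases hij : i = j
      · rw [if_pos hij, if_pos hij]
      · rw [if_neg hij, if_neg hij, if_neg hiE]
    rw [hA, filterMap_chain _ (fun j => i = j) (fun j => j ∈ aFullBins (currState.toList)) _ _,
      sorted_cands (currState.toList) i him]
    apply List.map_congr_left
    intro j hj
    rw [List.mem_filter, List.mem_range, decide_eq_true_eq] at hj
    obtain ⟨hjn, hij, hjF, _⟩ := hj
    have hnfj : binCh (currState.toList) j 3 = ' ' := by
      by_contra h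
      exact hjF ((mem_aFull _ j).mpr ⟨hjn, h⟩)
    rw [ins_getD _ j hjn hnfj, rem_getD _ i him, tops_getD _ i him,
      move_eq _ i j him hjn hij]
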